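-- pv_equiv track=rewrite | github.com/wjh4sg/PlotPilot | application/engine/services/word_control_service.py | _trim_by_visible_chars
-- ===== SOURCE A (Python) =====
-- def _trim_by_visible_chars(text: str, target: int) -> str:
--     pieces: list[str] = []
--     visible = 0
--     for char in text:
--         if not char.isspace():
--             visible += 1
--         if visible > target:
--             break
--         pieces.append(char)
--     return "".join(pieces).rstrip()
-- ===== SOURCE B (Python) =====
-- def _trim_by_visible_chars(text: str, target: int) -> str:
--     visible = 0
--     for i, char in enumerate(text):
--         if not char.isspace():
--             visible += 1
--             if visible > target:
--                 return text[:i].rstrip()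
--     return text.rstrip()
-- ===== Notes on version B (the rewrite author's own statement) =====
-- stated objective: simpler
-- what changed: B computes the cut index with a counter over enumerate and produces the result with one slice + rstrip, instead of appending kept characters to a list and joining; spaces after the last counted visible char need no special handling because rstrip removes them.
import Mathlib
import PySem

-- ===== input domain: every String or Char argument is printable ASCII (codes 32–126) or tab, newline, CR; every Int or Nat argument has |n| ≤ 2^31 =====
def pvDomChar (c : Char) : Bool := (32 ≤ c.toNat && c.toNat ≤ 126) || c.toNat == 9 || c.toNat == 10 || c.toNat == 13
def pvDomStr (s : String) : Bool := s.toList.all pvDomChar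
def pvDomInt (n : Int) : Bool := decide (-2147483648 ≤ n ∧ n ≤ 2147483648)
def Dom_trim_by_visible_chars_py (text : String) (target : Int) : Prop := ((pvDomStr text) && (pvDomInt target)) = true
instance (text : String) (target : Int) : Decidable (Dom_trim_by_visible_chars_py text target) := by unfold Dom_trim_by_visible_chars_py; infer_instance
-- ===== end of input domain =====

-- B computes the cut index with a counter over enumerate and builds the result with one
-- slice + rstrip, instead of appending kept characters to a list and joining (objective: simpler).

-- ===== PORT A =====
-- 'visible += 1 if not char.isspace()': the updated counter after one char
def pvVis (c : Char) (visible : Int) : Int :=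
  if !(PySem.Chars.isspace c) then visible + 1 else visible

-- the for-loop of A: state = (visible, pieces); break returns the pieces so far
def pvTrimALoop (cs : List Char) (target : Int) (visible : Int) (pieces : List Char) : List Char :=
  match cs with
  | [] => pieces
  | c :: rest =>
    if pvVis c visible > target then pieces
    else pvTrimALoop rest target (pvVis c visible) (pieces ++ [c])

def trim_by_visible_chars_py (text : String) (target : Int) : String :=
  PySem.Str.rstrip (String.ofList (pvTrimALoop text.toList target 0 []))

-- ===== PORT B =====
-- the for-loop of B over enumerate(text): returns the index i at which to cut, or none
def pvTrimBLoop (pairs : List (Int × Char)) (target : Int) (visible : Int) : Option Int :=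
  match pairs with
  | [] => none
  | (i, c) :: rest =>
    if !(PySem.Chars.isspace c) then
      if visible + 1 > target then some i
      else pvTrimBLoop rest target (visible + 1)
    else pvTrimBLoop rest target visible

def trim_by_visible_chars_py_alt (text : String) (target : Int) : String :=
  match pvTrimBLoop (PySem.List.enumerate text.toList 0) target 0 with
  | some i => PySem.Str.rstrip (String.ofList (PySem.List.slice text.toList none (some i)))
  | none => PySem.Str.rstrip text

-- ===== PRECONDITION & SPEC =====
def Spec_trim_by_visible_chars_py (text : String) (target : Int) (out : String) : Prop := out = trim_by_visible_chars_py_alt text target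
instance (text : String) (target : Int) (out : String) : Decidable (Spec_trim_by_visible_chars_py text target out) := by unfold Spec_trim_by_visible_chars_py; infer_instance

-- ===== CLAIM (what is proved, stated in full; the proofs are below) =====
def Claim_equal_trim_by_visible_chars_py : Prop := ∀ (text : String) (target : Int), Dom_trim_by_visible_chars_py text target → Spec_trim_by_visible_chars_py text target (trim_by_visible_chars_py text target)

-- ===== LEMMAS AND PROOFS =====

-- if B's loop stops, it stops at an index of the enumerated list, so at least the start
theorem pvTrimBLoop_ge (cs : List Char) (s : Int) (target visible i : Int)
    (h : pvTrimBLoop (PySem.List.enumerate cs s) target visible = some i) : s ≤ i := by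
  induction cs generalizing s visible with
  | nil => simp [PySem.List.enumerate_nil, pvTrimBLoop] at h
  | cons c rest ih =>
    rw [PySem.List.enumerate_cons] at h
    simp only [pvTrimBLoop] at h
    by_cases hs : PySem.Chars.isspace c
    · rw [if_neg (by simp [hs])] at h
      have := ih (s + 1) visible h
      omega
    · rw [if_pos (by simp [hs])] at h
      by_cases hv : visible + 1 > target
      · rw [if_pos hv] at h
        injection h with h
        omega
      · rw [if_neg hv] at h
        have := ih (s + 1) (visible + 1) h
        omega

-- main invariant (target not exceeded yet): A's loop result is pieces ++ the prefix B cuts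
theorem pvTrimLoop_eq (cs : List Char) (s : Int) (target visible : Int) (pieces : List Char)
    (hv : visible ≤ target) :
    pvTrimALoop cs target visible pieces =
      pieces ++ (match pvTrimBLoop (PySem.List.enumerate cs s) target visible with
                 | some i => cs.take (i - s).toNat
                 | none => cs) := by
  induction cs generalizing s visible pieces with
  | nil => simp [pvTrimALoop, PySem.List.enumerate_nil, pvTrimBLoop]
  | cons c rest ih =>
    rw [PySem.List.enumerate_cons]
    unfold pvTrimALoop pvTrimBLoop pvVis
    by_cases hs : PySem.Chars.isspace c
    · simp only [hs, Bool.not_true, Bool.false_eq_true, ite_false]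
      have hnb : ¬ visible > target := by omega
      simp only [if_neg hnb]
      rw [ih (s + 1) visible (pieces ++ [c]) hv]
      cases hB : pvTrimBLoop (PySem.List.enumerate rest (s + 1)) target visible with
      | none => simp
      | some i =>
        have hge := pvTrimBLoop_ge rest (s + 1) target visible i hB
        have : (i - s).toNat = (i - (s + 1)).toNat + 1 := by omega
        simp [this]
    · simp only [hs, Bool.not_false, if_pos]
      by_cases hv1 : visible + 1 > target
      · simp only [if_pos hv1]
        simp
      · simp only [if_neg hv1]
        rw [ih (s + 1) (visible + 1) (pieces ++ [c]) (by omega)]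
        cases hB : pvTrimBLoop (PySem.List.enumerate rest (s + 1)) target (visible + 1) with
        | none => simp
        | some i =>
          have hge := pvTrimBLoop_ge rest (s + 1) target (visible + 1) i hB
          have : (i - s).toNat = (i - (s + 1)).toNat + 1 := by omega
          simp [this]

-- when the count already exceeds target, B's cut prefix (resp. the whole string) is all spaces
theorem pvTrimBLoop_spaces (cs : List Char) (s : Int) (target visible : Int) (hv : target < visible) :
    (match pvTrimBLoop (PySem.List.enumerate cs s) target visible with
     | some i => ∀ c ∈ cs.take (i - s).toNat, PySem.Chars.isspace c = true
     | none => ∀ c ∈ cs, PySem.Chars.isspace c = true) := by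
  induction cs generalizing s visible with
  | nil => simp [PySem.List.enumerate_nil, pvTrimBLoop]
  | cons c rest ih =>
    rw [PySem.List.enumerate_cons]
    unfold pvTrimBLoop
    by_cases hs : PySem.Chars.isspace c
    · simp only [hs, Bool.not_true, Bool.false_eq_true, ite_false]
      have := ih (s + 1) visible hv
      cases hB : pvTrimBLoop (PySem.List.enumerate rest (s + 1)) target visible with
      | none =>
        rw [hB] at this
        simpa [hs] using this
      | some i =>
        rw [hB] at this
        have hge := pvTrimBLoop_ge rest (s + 1) target visible i hB
        have hnat : (i - s).toNat = (i - (s + 1)).toNat + 1 := by omega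
        simp only [hnat, List.take_succ_cons]
        intro x hx
        rcases List.mem_cons.mp hx with h | h
        · subst h; exact hs
        · exact this x h
    · have hv1 : visible + 1 > target := by omega
      simp only [hs, Bool.not_false, if_pos, if_pos hv1]
      simp

-- rstrip of an all-space list is empty
theorem pvRstrip_all_space (l : List Char) (h : ∀ c ∈ l, PySem.Chars.isspace c = true) :
    PySem.Chars.rstrip l = [] := by
  unfold PySem.Chars.rstrip
  have : l.reverse.dropWhile PySem.Chars.isspace = [] := by
    apply List.dropWhile_eq_nil_iff.mpr
    intro x hx
    exact h x (List.mem_reverse.mp hx)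
  simp [this]

-- two strings whose char lists have equal rstrip give equal Str.rstrip
theorem pvStrRstrip_eq (a b : String) (h : PySem.Chars.rstrip a.toList = PySem.Chars.rstrip b.toList) :
    PySem.Str.rstrip a = PySem.Str.rstrip b := by
  apply String.toList_injective
  rw [PySem.Str.toList_rstrip, PySem.Str.toList_rstrip, h]

-- ===== VERDICT (by name: the statement is the Claim_ definition above) =====
theorem pvToList_ofList (l : List Char) : (String.ofList l).toList = l := by simp

theorem trim_by_visible_chars_py_spec : Claim_equal_trim_by_visible_chars_py := by
  intro text target _
  unfold Spec_trim_by_visible_chars_py trim_by_visible_chars_py trim_by_visible_chars_py_alt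
  by_cases ht : (0 : Int) ≤ target
  · -- target ≥ 0: the loop invariant applies directly
    rw [pvTrimLoop_eq text.toList 0 target 0 [] ht]
    cases hB : pvTrimBLoop (PySem.List.enumerate text.toList 0) target 0 with
    | none =>
      apply pvStrRstrip_eq
      simp
    | some i =>
      have hge := pvTrimBLoop_ge text.toList 0 target 0 i hB
      dsimp only
      rw [PySem.List.slice_to _ hge]
      simp
  · -- target < 0: both sides are all-space lists before rstrip, hence both ""
    have hlt : target < 0 := by omega
    have hA : pvTrimALoop text.toList target 0 [] = [] := by
      cases text.toList with
      | nil => rfl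
      | cons c rest =>
        unfold pvTrimALoop
        by_cases hs : PySem.Chars.isspace c <;> simp [pvVis, hs] <;> omega
    have hSp := pvTrimBLoop_spaces text.toList 0 target 0 hlt
    cases hB : pvTrimBLoop (PySem.List.enumerate text.toList 0) target 0 with
    | none =>
      rw [hB] at hSp
      dsimp only
      rw [hA]
      apply pvStrRstrip_eq
      rw [pvToList_ofList, pvRstrip_all_space _ hSp, pvRstrip_all_space [] (by simp)]
    | some i =>
      rw [hB] at hSp
      simp only [Int.sub_zero] at hSp
      have hge := pvTrimBLoop_ge text.toList 0 target 0 i hB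
      dsimp only
      rw [PySem.List.slice_to _ hge, hA]
      apply pvStrRstrip_eq
      rw [pvToList_ofList, pvToList_ofList, pvRstrip_all_space _ hSp,
        pvRstrip_all_space [] (by simp)]
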